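-- pv_equiv track=rewrite | github.com/PonasKovas/craftflow | craftflow-protocol-versions/main.py | find_closest_below
-- ===== SOURCE A (Python) =====
-- def find_closest_below(versions, version):
--     closest_version = None
--
--     for v in versions:
--         if v < version:
--             closest_version = v
--         else:
--             break
--
--     return closest_version
-- ===== SOURCE B (Python) =====
-- def find_closest_below(versions, version):
--     bad = [i for i, v in enumerate(versions) if v >= version]
--     cut = bad[0] if bad else len(versions)
--     return versions[cut - 1] if cut > 0 else None
-- ===== Notes on version B (the rewrite author's own statement) =====
-- stated objective: alternative
-- what changed: A's early-breaking scan with a running closest_version accumulator is replaced by a staged, break-free formulation: one comprehension collects all indices whose element fails the v < version test, the cut point is the first such index (or the length), and the answer is the element just before the cut; no accumulator and no early exit.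
import Mathlib
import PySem

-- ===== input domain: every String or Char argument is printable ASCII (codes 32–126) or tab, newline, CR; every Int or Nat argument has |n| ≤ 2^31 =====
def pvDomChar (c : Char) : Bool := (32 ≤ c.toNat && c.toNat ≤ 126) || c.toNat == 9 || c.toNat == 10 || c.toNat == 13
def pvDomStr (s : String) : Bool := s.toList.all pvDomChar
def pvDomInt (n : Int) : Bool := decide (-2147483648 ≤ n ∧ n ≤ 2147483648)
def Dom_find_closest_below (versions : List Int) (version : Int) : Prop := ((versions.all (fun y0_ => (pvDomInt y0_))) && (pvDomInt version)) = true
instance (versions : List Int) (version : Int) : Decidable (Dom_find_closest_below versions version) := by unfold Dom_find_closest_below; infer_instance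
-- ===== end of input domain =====

-- B replaces A's early-breaking accumulator scan with a break-free staged formulation
-- (collect all violating indices, cut at the first one, index back); alternative decomposition, same O(n).

-- ===== PORT A =====
-- the for-loop with break, carrying the accumulator closest_version
def fcbGo (versions : List Int) (version : Int) (acc : Option Int) : Option Int :=
  match versions with
  | [] => acc
  | x :: xs => if x < version then fcbGo xs version (some x) else acc

def find_closest_below (versions : List Int) (version : Int) : Option Int :=
  fcbGo versions version none

-- ===== PORT B =====
-- bad = [i for i, v in enumerate(versions) if v >= version]; cut = bad[0] if bad else len(versions);
-- return versions[cut - 1] if cut > 0 else None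
def find_closest_below_alt (versions : List Int) (version : Int) : Option Int :=
  let bad := ((PySem.List.enumerate versions).filter (fun p => decide (version ≤ p.2))).map Prod.fst
  let cut : Int := match bad with | [] => (versions.length : Int) | i :: _ => i
  if cut > 0 then PySem.List.pyGet? versions (cut - 1) else none

-- ===== PRECONDITION & SPEC =====
def Spec_find_closest_below (versions : List Int) (version : Int) (out : Option Int) : Prop := out = find_closest_below_alt versions version
instance (versions : List Int) (version : Int) (out : Option Int) : Decidable (Spec_find_closest_below versions version out) := by unfold Spec_find_closest_below; infer_instance

-- ===== CLAIM =====
def Claim_equal_find_closest_below : Prop := ∀ (versions : List Int) (version : Int), Dom_find_closest_below versions version → Spec_find_closest_below versions version (find_closest_below versions version)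

-- ===== LEMMAS AND PROOFS =====

-- proof-only helper: length of the accepted prefix (elements < version)
def fcbCount (versions : List Int) (version : Int) : Nat :=
  match versions with
  | [] => 0
  | x :: xs => if x < version then fcbCount xs version + 1 else 0

theorem fcbGo_eq_count (versions : List Int) (version : Int) (acc : Option Int) :
    fcbGo versions version acc =
      (if fcbCount versions version > 0
       then PySem.List.pyGet? versions ((fcbCount versions version : Int) - 1)
       else acc) := by
  induction versions generalizing acc with
  | nil => simp [fcbGo, fcbCount]
  | cons x xs ih =>
    by_cases hx : x < version
    · rw [fcbGo, if_pos hx, ih]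
      have hc : fcbCount (x :: xs) version = fcbCount xs version + 1 := by
        simp [fcbCount, hx]
      rw [hc, if_pos (by omega : fcbCount xs version + 1 > 0)]
      rcases Nat.eq_zero_or_pos (fcbCount xs version) with h0 | hpos
      · rw [h0, if_neg (by omega)]
        norm_num [PySem.List.pyGet?_zero_cons]
      · obtain ⟨d, hd⟩ : ∃ d, fcbCount xs version = d + 1 :=
          ⟨_, (Nat.succ_pred_eq_of_pos hpos).symm⟩
        rw [hd, if_pos (by omega)]
        have e1 : ((d + 1 + 1 : Nat) : Int) - 1 = ((d + 1 : Nat) : Int) := by push_cast; ring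
        have e2 : ((d + 1 : Nat) : Int) - 1 = ((d : Nat) : Int) := by push_cast; ring
        rw [e1]
        have e3 : ((d + 1 : Nat) : Int) = ((d : Nat) : Int) + 1 := by push_cast; ring
        rw [e3, PySem.List.pyGet?_cons_succ]; norm_num
    · have hc : fcbCount (x :: xs) version = 0 := by simp [fcbCount, hx]
      rw [fcbGo, if_neg hx, hc]
      simp

-- the first violating index in enumerate (or the length when none) is the accepted-prefix length
theorem cut_eq_count (xs : List Int) (version : Int) (s : Int) :
    (match ((PySem.List.enumerate xs s).filter (fun p => decide (version ≤ p.2))).map Prod.fst with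
     | [] => s + (xs.length : Int)
     | i :: _ => i) = s + (fcbCount xs version : Int) := by
  induction xs generalizing s with
  | nil => simp [PySem.List.enumerate_nil, fcbCount]
  | cons x xs ih =>
    rw [PySem.List.enumerate_cons]
    by_cases hx : x < version
    · have hnot : ¬ version ≤ x := by omega
      simp only [List.filter_cons, decide_eq_true_eq, if_neg hnot]
      have ih' := ih (s + 1)
      cases hm : ((PySem.List.enumerate xs (s + 1)).filter (fun p => decide (version ≤ p.2))).map Prod.fst with
      | nil =>
        rw [hm] at ih'
        simp [fcbCount, hx] at ih' ⊢
        omega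
      | cons i t =>
        rw [hm] at ih'
        simp [fcbCount, hx] at ih' ⊢
        omega
    · have hle : version ≤ x := by omega
      simp only [List.filter_cons, decide_eq_true_eq, if_pos hle, List.map_cons]
      simp [fcbCount, hx]

-- ===== VERDICT =====
theorem find_closest_below_spec : Claim_equal_find_closest_below := by
  intro versions version _
  unfold Spec_find_closest_below find_closest_below find_closest_below_alt
  rw [fcbGo_eq_count]
  have h := cut_eq_count versions version 0
  simp only [zero_add] at h
  simp only [h]
  rcases Nat.eq_zero_or_pos (fcbCount versions version) with h0 | hpos
  · simp [h0]
  · rw [if_pos hpos, if_pos (by exact_mod_cast hpos)]
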